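-- pv_equiv track=rewrite | github.com/Markshah/card_detect | Rank/card_detect.py | parse_dash_args
-- ===== SOURCE A (Python) =====
-- def parse_dash_args(argv):
--     args = {}
--     key = None
--     for token in argv:
--         if token.startswith('-') and not token.startswith('--'):
--             key = token.lstrip('-'); args[key] = None
--         else:
--             if key: args[key] = token; key = None
--     return args
-- ===== SOURCE B (Python) =====
-- def parse_dash_args(argv):
--     args = {}
--     i = 0
--     n = len(argv)
--     while i < n:
--         token = argv[i]
--         if token.startswith('-') and not token.startswith('--'):
--             key = token.lstrip('-')
--             args[key] = None
--             if key and i + 1 < n: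
--                 nxt = argv[i + 1]
--                 if not (nxt.startswith('-') and not nxt.startswith('--')):
--                     args[key] = nxt
--                     i += 2
--                     continue
--         i += 1
--     return args
-- ===== Notes on version B (the rewrite author's own statement) =====
-- stated objective: alternative
-- what changed: Replaced A's carried-pending-key state machine over tokens with an index-based while loop that pairs each short flag with its value eagerly by looking ahead at the next token.
import Mathlib
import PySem

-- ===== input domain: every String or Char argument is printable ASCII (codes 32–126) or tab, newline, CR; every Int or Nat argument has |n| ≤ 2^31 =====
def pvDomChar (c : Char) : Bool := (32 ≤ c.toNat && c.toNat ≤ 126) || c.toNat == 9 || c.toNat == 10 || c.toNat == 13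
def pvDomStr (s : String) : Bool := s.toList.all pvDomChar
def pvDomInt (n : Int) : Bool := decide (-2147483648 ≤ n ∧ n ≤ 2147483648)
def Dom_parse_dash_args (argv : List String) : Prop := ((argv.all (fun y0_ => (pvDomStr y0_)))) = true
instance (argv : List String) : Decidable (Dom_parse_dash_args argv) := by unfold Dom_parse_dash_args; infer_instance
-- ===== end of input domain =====

-- B replaces A's carried-pending-key state machine by an index/lookahead scan that
-- pairs each flag with its value immediately by peeking at the next token (objective: alternative).

-- shared faithful primitives: "token.startswith('-') and not token.startswith('--')" and "token.lstrip('-')"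
-- (lstrip with a chars argument is not in PySem; dropWhile (· == '-') is exact for a single-char strip set)
def pvFlag (t : String) : Bool :=
  PySem.Str.startswith t "-" && !(PySem.Str.startswith t "--")

def pvLstripDash (s : String) : String :=
  String.ofList (s.toList.dropWhile (· == '-'))

-- ===== PORT A =====
def pvStepA (p : PySem.Dict String (Option String) × Option String) (token : String) :
    PySem.Dict String (Option String) × Option String :=
  if pvFlag token then
    let key := pvLstripDash token
    (p.1.insert key none, some key)
  else
    match p.2 with
    | some k => if k ≠ "" then (p.1.insert k (some token), none) else p
    | none => p

def parse_dash_args (argv : List String) : List (String × Option String) :=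
  (List.foldl pvStepA (PySem.Dict.empty, none) argv).1.items

-- ===== PORT B =====
def pvAltLoop : List String → PySem.Dict String (Option String) → PySem.Dict String (Option String)
  | [], args => args
  | token :: rest, args =>
    if pvFlag token then
      let key := pvLstripDash token
      let args1 := args.insert key none
      match rest with
      | nxt :: rest2 =>
        if (key != "") && !pvFlag nxt then pvAltLoop rest2 (args1.insert key (some nxt))
        else pvAltLoop (nxt :: rest2) args1
      | [] => args1
    else pvAltLoop rest args
termination_by l _ => l.length
decreasing_by all_goals (simp_wf; try omega)

def parse_dash_args_alt (argv : List String) : List (String × Option String) :=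
  (pvAltLoop argv PySem.Dict.empty).items

-- ===== PRECONDITION & SPEC =====
def Spec_parse_dash_args (argv : List String) (out : List (String × Option String)) : Prop := out = parse_dash_args_alt argv
instance (argv : List String) (out : List (String × Option String)) : Decidable (Spec_parse_dash_args argv out) := by unfold Spec_parse_dash_args; infer_instance

-- ===== CLAIM (what is proved, stated in full; the proofs are below) =====
def Claim_equal_parse_dash_args : Prop := ∀ (argv : List String), Dom_parse_dash_args argv → Spec_parse_dash_args argv (parse_dash_args argv)

-- ===== LEMMAS AND PROOFS =====

lemma altLoop_nil (args : PySem.Dict String (Option String)) : pvAltLoop [] args = args := by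
  rw [pvAltLoop]

lemma altLoop_nonflag (t : String) (rest : List String) (args : PySem.Dict String (Option String))
    (hf : pvFlag t = false) : pvAltLoop (t :: rest) args = pvAltLoop rest args := by
  rw [pvAltLoop]; simp [hf]

lemma altLoop_flag_nil (t : String) (args : PySem.Dict String (Option String))
    (hf : pvFlag t = true) : pvAltLoop [t] args = args.insert (pvLstripDash t) none := by
  rw [pvAltLoop]; simp [hf]

lemma altLoop_flag_cons (t nxt : String) (rest2 : List String)
    (args : PySem.Dict String (Option String)) (hf : pvFlag t = true) :
    pvAltLoop (t :: nxt :: rest2) args =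
      (if (pvLstripDash t != "") && !pvFlag nxt then
        pvAltLoop rest2 ((args.insert (pvLstripDash t) none).insert (pvLstripDash t) (some nxt))
      else pvAltLoop (nxt :: rest2) (args.insert (pvLstripDash t) none)) := by
  rw [pvAltLoop]; simp only [hf, if_true]

/-- The loop invariant: A's fold from a pending-key state equals B's lookahead loop.
A key of `none` or `some ""` is inert (Python's falsy check), and a pending non-empty
key consumes exactly the next non-flag token — which is what B's peek does eagerly. -/
lemma pv_loop (argv : List String) : ∀ args : PySem.Dict String (Option String),
    ((List.foldl pvStepA (args, none) argv).1 = pvAltLoop argv args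
  ∧ (List.foldl pvStepA (args, some "") argv).1 = pvAltLoop argv args)
  ∧ ∀ k, k ≠ "" → (List.foldl pvStepA (args, some k) argv).1 =
      (match argv with
       | [] => args
       | t :: rest =>
         if pvFlag t then pvAltLoop (t :: rest) args
         else pvAltLoop rest (args.insert k (some t))) := by
  induction argv with
  | nil =>
    intro args
    refine ⟨⟨by simp [altLoop_nil], by simp [altLoop_nil]⟩, fun k hk => rfl⟩
  | cons t rest ih =>
    intro args
    by_cases hf : pvFlag t = true
    · -- flag token: the old key is discarded, all three start states coincide
      have hstep : ∀ key : Option String,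
          List.foldl pvStepA (args, key) (t :: rest)
            = List.foldl pvStepA (args.insert (pvLstripDash t) none, some (pvLstripDash t)) rest := by
        intro key; simp [List.foldl, pvStepA, hf]
      have hmain : (List.foldl pvStepA (args, (none : Option String)) (t :: rest)).1
          = pvAltLoop (t :: rest) args := by
        rw [hstep]
        by_cases hk0 : pvLstripDash t = ""
        · rw [hk0, (ih (args.insert "" none)).1.2]
          cases rest with
          | nil => rw [altLoop_nil, altLoop_flag_nil t args hf, hk0]
          | cons nxt rest2 =>
            rw [altLoop_flag_cons t nxt rest2 args hf]
            simp [hk0]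
        · rw [(ih (args.insert (pvLstripDash t) none)).2 _ hk0]
          cases rest with
          | nil => rw [altLoop_flag_nil t args hf]
          | cons nxt rest2 =>
            rw [altLoop_flag_cons t nxt rest2 args hf]
            by_cases hn : pvFlag nxt = true
            · simp [hn]
            · simp only [Bool.not_eq_true] at hn
              simp [hn, bne_iff_ne, hk0]
      refine ⟨⟨hmain, by rw [hstep, ← hstep none]; exact hmain⟩, fun k hk => ?_⟩
      simp only [hf, if_pos]
      rw [hstep, ← hstep none]; exact hmain
    · -- non-flag token
      have hf' : pvFlag t = false := by simpa using hf
      refine ⟨⟨?_, ?_⟩, fun k hk => ?_⟩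
      · have h : List.foldl pvStepA (args, (none : Option String)) (t :: rest)
            = List.foldl pvStepA (args, none) rest := by simp [List.foldl, pvStepA, hf']
        rw [h, (ih args).1.1, altLoop_nonflag t rest args hf']
      · have h : List.foldl pvStepA (args, (some "" : Option String)) (t :: rest)
            = List.foldl pvStepA (args, some "") rest := by simp [List.foldl, pvStepA, hf']
        rw [h, (ih args).1.2, altLoop_nonflag t rest args hf']
      · have h : List.foldl pvStepA (args, some k) (t :: rest)
            = List.foldl pvStepA (args.insert k (some t), none) rest := by
          simp [List.foldl, pvStepA, hf', hk]
        rw [h, (ih (args.insert k (some t))).1.1]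
        simp [hf']

-- ===== VERDICT (by name: the statement is the Claim_ definition above) =====
theorem parse_dash_args_spec : Claim_equal_parse_dash_args := by
  intro argv _
  unfold Spec_parse_dash_args parse_dash_args parse_dash_args_alt
  rw [(pv_loop argv PySem.Dict.empty).1.1]
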